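-- pv_equiv track=rewrite | github.com/ohoon/programmers_ex | level2/방금그곡.py | solution
-- ===== SOURCE A (Python) =====
-- def sharpToLower(m):
--     return m.replace('C#', 'c').replace('D#', 'd').replace('F#', 'f').replace('G#', 'g').replace('A#', 'a')
--
-- def solution(m, musicinfos):
--     musicinfos = [x.split(',') for x in musicinfos]
--     m = sharpToLower(m)
--     radio = []
--
--     for info in musicinfos:
--         startTime = list(map(int, info[0].split(':')))
--         endTime = list(map(int, info[1].split(':')))
--         dur = abs((endTime[0] - startTime[0]) * 60 + (endTime[1] - startTime[1]))
--         melody = sharpToLower(info[3])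
--         radio_melody = melody * (dur // len(melody)) + melody[:dur % len(melody)]
--         radio.append([info[2], radio_melody, dur])
--
--     candidate = list(filter(lambda x: x[1].find(m) > -1, radio))
--     if not candidate:
--         return "(None)"
--
--     return sorted(candidate, key=lambda x: -x[2])[0][0]
-- ===== SOURCE B (Python) =====
-- def sharpToLower(m):
--     return m.replace('C#', 'c').replace('D#', 'd').replace('F#', 'f').replace('G#', 'g').replace('A#', 'a')
--
-- def _minutes(t):
--     f = t.split(':')
--     return int(f[0]) * 60 + int(f[1])
--
-- def _played(melody, dur):
--     return (melody * (dur // len(melody) + 1))[:dur]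
--
-- def _step(target, best, info):
--     start, end, title, melody = info.split(',')[:4]
--     dur = abs(_minutes(end) - _minutes(start))
--     if target in _played(sharpToLower(melody), dur) and dur > best[1]:
--         return (title, dur)
--     return best
--
-- def solution(m, musicinfos):
--     target = sharpToLower(m)
--     best = ("(None)", -1)
--     for info in musicinfos:
--         best = _step(target, best, info)
--     return best[0]
-- ===== Notes on version B (the rewrite author's own statement) =====
-- stated objective: simpler
-- what changed: Replaces A's build-a-radio-list / filter / stable-sort-by-negated-duration / take-head pipeline with a single running-best fold over small helpers: minutes-since-midnight time parsing instead of componentwise subtraction, play string as one truncated repetition (melody*(dur//len+1))[:dur] instead of full-repeats-plus-prefix, and strict '>' so the first of equal-duration matches wins exactly as the stable sort does.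
import Mathlib
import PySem

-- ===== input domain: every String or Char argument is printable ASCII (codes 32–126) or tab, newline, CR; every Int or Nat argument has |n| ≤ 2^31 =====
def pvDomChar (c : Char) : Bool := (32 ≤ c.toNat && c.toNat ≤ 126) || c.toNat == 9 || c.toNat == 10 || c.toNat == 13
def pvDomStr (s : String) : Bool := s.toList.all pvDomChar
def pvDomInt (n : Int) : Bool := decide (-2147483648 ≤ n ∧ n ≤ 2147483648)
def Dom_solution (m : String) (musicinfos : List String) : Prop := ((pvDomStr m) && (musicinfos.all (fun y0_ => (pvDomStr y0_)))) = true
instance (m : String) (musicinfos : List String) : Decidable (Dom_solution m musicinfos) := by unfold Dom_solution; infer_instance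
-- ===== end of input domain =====

-- B replaces A's list/filter/stable-sort pipeline with a single running-best pass built from
-- small helpers (minutes-since-midnight parsing, play-string as a truncated repetition).


-- ===== PORT A =====
def sharpToLower (m : String) : String :=
  PySem.Str.replace (PySem.Str.replace (PySem.Str.replace (PySem.Str.replace (PySem.Str.replace
    m "C#" "c") "D#" "d") "F#" "f") "G#" "g") "A#" "a"

-- split on the nonempty literal separators "," / ":" never raises, so the `.getD []` default never fires
def solution (m : String) (musicinfos : List String) : String :=
  let infos := musicinfos.map (fun x => (PySem.Str.split? x ",").getD [])
  let m' := sharpToLower m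
  let radio := infos.foldl (fun radio info =>
      let startTime := ((PySem.Str.split? (PySem.List.pyGetD info 0 "") ":").getD []).map (fun s => (PySem.Int.ofStr? s).getD 0)
      let endTime := ((PySem.Str.split? (PySem.List.pyGetD info 1 "") ":").getD []).map (fun s => (PySem.Int.ofStr? s).getD 0)
      let dur := |(PySem.List.pyGetD endTime 0 0 - PySem.List.pyGetD startTime 0 0) * 60 +
                  (PySem.List.pyGetD endTime 1 0 - PySem.List.pyGetD startTime 1 0)|
      let melody := (sharpToLower (PySem.List.pyGetD info 3 "")).toList
      let radio_melody := PySem.List.pyRepeat melody (PySem.Int.floordiv dur (melody.length : Int)) ++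
                          PySem.List.slice melody none (some (PySem.Int.mod dur (melody.length : Int)))
      radio ++ [(PySem.List.pyGetD info 2 "", radio_melody, dur)])
    []
  let candidate := radio.filter (fun x => decide (PySem.Chars.find x.2.1 m'.toList > -1))
  if candidate = [] then "(None)"
  else (PySem.List.pyGetD (PySem.List.sorted candidate (fun x => -x.2.2) false) 0 ("", [], 0)).1

-- ===== PORT B =====
-- minutes-since-midnight of a "HH:MM[...]" field (Python: int(f[0])*60 + int(f[1]))
def pvMinutes (t : String) : Int :=
  let f := (PySem.Str.split? t ":").getD []
  ((PySem.Int.ofStr? (f.getD 0 "")).getD 0) * 60 + (PySem.Int.ofStr? (f.getD 1 "")).getD 0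

-- (melody * (dur // len(melody) + 1))[:dur]
def pvPlayed (melody : List Char) (dur : Int) : List Char :=
  PySem.List.slice (PySem.List.pyRepeat melody (PySem.Int.floordiv dur (melody.length : Int) + 1)) none (some dur)

-- the '_ => best' arm is where Python's 4-tuple unpacking raises ValueError; Pre_ excludes those inputs
def pvStep (target : List Char) (best : String × Int) (info : String) : String × Int :=
  match PySem.List.slice ((PySem.Str.split? info ",").getD []) none (some 4) with
  | [st, en, title, mel] =>
    let dur := |pvMinutes en - pvMinutes st|
    if PySem.Chars.isIn target (pvPlayed (sharpToLower mel).toList dur) ∧ dur > best.2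
    then (title, dur) else best
  | _ => best

def solution_alt (m : String) (musicinfos : List String) : String :=
  let target := (sharpToLower m).toList
  (musicinfos.foldl (fun best info => pvStep target best info) ("(None)", -1)).1

-- ===== PRECONDITION & SPEC =====
-- Pre_ excludes exactly the inputs where the Python A raises: an entry with fewer than 4
-- comma fields (IndexError), a start/end field that does not split into ≥ 2 all-int parts
-- (ValueError/IndexError), or a melody that is empty after sharp conversion (ZeroDivisionError).
def Pre_solution (m : String) (musicinfos : List String) : Prop :=
  ∀ info ∈ musicinfos,
    let parts := (PySem.Str.split? info ",").getD []
    4 ≤ parts.length ∧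
    2 ≤ ((PySem.Str.split? (parts.getD 0 "") ":").getD []).length ∧
    (∀ v ∈ (PySem.Str.split? (parts.getD 0 "") ":").getD [], (PySem.Int.ofStr? v).isSome) ∧
    2 ≤ ((PySem.Str.split? (parts.getD 1 "") ":").getD []).length ∧
    (∀ v ∈ (PySem.Str.split? (parts.getD 1 "") ":").getD [], (PySem.Int.ofStr? v).isSome) ∧
    (sharpToLower (parts.getD 3 "")).toList ≠ []
instance (m : String) (musicinfos : List String) : Decidable (Pre_solution m musicinfos) := by
  unfold Pre_solution; infer_instance

def pvWitness_solution : String × List String := ("ABC", ["12:00,12:14,HELLO,ABCDEF"])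

def Spec_solution (m : String) (musicinfos : List String) (out : String) : Prop := out = solution_alt m musicinfos
instance (m : String) (musicinfos : List String) (out : String) : Decidable (Spec_solution m musicinfos out) := by unfold Spec_solution; infer_instance

-- ===== CLAIM (what is proved, stated in full; the proofs are below) =====
def Claim_equal_solution : Prop := ∀ (m : String) (musicinfos : List String), Dom_solution m musicinfos → Pre_solution m musicinfos → Spec_solution m musicinfos (solution m musicinfos)

-- ===== LEMMAS AND PROOFS =====

/-- The (title, expanded melody, duration) triple A computes from one entry. -/
def pvEntry (info : String) : String × List Char × Int :=
  let parts := (PySem.Str.split? info ",").getD []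
  let st := ((PySem.Str.split? (PySem.List.pyGetD parts 0 "") ":").getD []).map (fun s => (PySem.Int.ofStr? s).getD 0)
  let et := ((PySem.Str.split? (PySem.List.pyGetD parts 1 "") ":").getD []).map (fun s => (PySem.Int.ofStr? s).getD 0)
  let dur := |(PySem.List.pyGetD et 0 0 - PySem.List.pyGetD st 0 0) * 60 +
              (PySem.List.pyGetD et 1 0 - PySem.List.pyGetD st 1 0)|
  let melody := (sharpToLower (PySem.List.pyGetD parts 3 "")).toList
  (PySem.List.pyGetD parts 2 "",
   PySem.List.pyRepeat melody (PySem.Int.floordiv dur (melody.length : Int)) ++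
     PySem.List.slice melody none (some (PySem.Int.mod dur (melody.length : Int))),
   dur)

/-- A's closed-out pipeline on the parsed entries. -/
def pvA (mt : List Char) (L : List (String × List Char × Int)) : String :=
  let candidate := L.filter (fun x => decide (PySem.Chars.find x.2.1 mt > -1))
  if candidate = [] then "(None)"
  else (PySem.List.pyGetD (PySem.List.sorted candidate (fun x => -x.2.2) false) 0 ("", [], 0)).1

/-- The running-best fold on the parsed entries. -/
def pvB (mt : List Char) (L : List (String × List Char × Int)) : String :=
  (L.foldl (fun best e => if PySem.Chars.isIn mt e.2.1 = true ∧ e.2.2 > best.2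
                          then (e.1, e.2.2) else best) ("(None)", -1)).1

/-- The per-entry condition Pre_ imposes. -/
def pvOk (info : String) : Prop :=
  let parts := (PySem.Str.split? info ",").getD []
  4 ≤ parts.length ∧
  2 ≤ ((PySem.Str.split? (parts.getD 0 "") ":").getD []).length ∧
  (∀ v ∈ (PySem.Str.split? (parts.getD 0 "") ":").getD [], (PySem.Int.ofStr? v).isSome) ∧
  2 ≤ ((PySem.Str.split? (parts.getD 1 "") ":").getD []).length ∧
  (∀ v ∈ (PySem.Str.split? (parts.getD 1 "") ":").getD [], (PySem.Int.ofStr? v).isSome) ∧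
  (sharpToLower (parts.getD 3 "")).toList ≠ []

lemma pvEntry_dur_nonneg (info : String) : 0 ≤ (pvEntry info).2.2 := by
  simp only [pvEntry]
  exact abs_nonneg _

lemma solution_eq_pvA (m : String) (ms : List String) :
    solution m ms = pvA (sharpToLower m).toList (ms.map pvEntry) := by
  simp only [solution, pvA, PySem.List.foldl_append_singleton_eq_map, List.nil_append, List.map_map]
  rfl

lemma pvRepeat_succ (xs : List Char) (q : Int) (h : 0 ≤ q) :
    PySem.List.pyRepeat xs (q + 1) = PySem.List.pyRepeat xs q ++ xs := by
  have h1 : (q + 1).toNat = q.toNat + 1 := by omega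
  simp [PySem.List.pyRepeat, h1, List.replicate_succ']

lemma pvRepeat_length (xs : List Char) (q : Int) :
    (PySem.List.pyRepeat xs q).length = q.toNat * xs.length := by
  simp [PySem.List.pyRepeat, List.length_flatten]

/-- B's truncated-repetition play string equals A's full-repeats-plus-prefix one. -/
lemma pvPlayed_eq (mel : List Char) (dur : Int) (hm : mel ≠ []) (hd : 0 ≤ dur) :
    pvPlayed mel dur =
      PySem.List.pyRepeat mel (PySem.Int.floordiv dur (mel.length : Int)) ++
        PySem.List.slice mel none (some (PySem.Int.mod dur (mel.length : Int))) := by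
  have hL : (0 : Int) < (mel.length : Int) := by
    have : mel.length ≠ 0 := by simpa [List.length_eq_zero_iff] using hm
    omega
  set L := (mel.length : Int) with hLdef
  set q := PySem.Int.floordiv dur L with hq
  set r := PySem.Int.mod dur L with hr
  have hq0 : 0 ≤ q := by
    rw [hq, ← sub_nonneg]
    have := (PySem.Int.le_floordiv_iff_mul_le (a := dur) (b := L) (q := 0) hL).mpr (by omega)
    omega
  have hr0 : 0 ≤ r := PySem.Int.mod_nonneg dur hL
  have hrL : r < L := PySem.Int.mod_lt dur hL
  have hsum : q * L + r = dur := PySem.Int.floordiv_mul_add_mod dur L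
  unfold pvPlayed
  rw [← hLdef, ← hq, pvRepeat_succ mel q hq0,
      PySem.List.slice_to _ hd, PySem.List.slice_to _ hr0]
  have hlen : (PySem.List.pyRepeat mel q).length = q.toNat * mel.length :=
    pvRepeat_length mel q
  have hdn : dur.toNat = (PySem.List.pyRepeat mel q).length + r.toNat := by
    rw [hlen]
    have h1 : ((q.toNat * mel.length + r.toNat : Nat) : Int) = dur := by
      push_cast
      rw [Int.toNat_of_nonneg hq0, Int.toNat_of_nonneg hr0]
      omega
    omega
  rw [hdn, List.take_append, List.take_of_length_le (Nat.le_add_right _ _), Nat.add_sub_cancel_left]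

/-- B's loop body on one Pre_-conforming entry equals the running-best step on A's triple. -/
lemma pv_body_eq (target : List Char) (info : String) (h : pvOk info) (best : String × Int) :
    pvStep target best info
    = (if PySem.Chars.isIn target (pvEntry info).2.1 = true ∧ (pvEntry info).2.2 > best.2
       then ((pvEntry info).1, (pvEntry info).2.2) else best) := by
  obtain ⟨h4, hs2, hsok, he2, heok, hmel⟩ := h
  simp only [pvStep, pvEntry, pvMinutes]
  generalize hP : (PySem.Str.split? info ",").getD [] = parts at *
  rcases parts with _ | ⟨p0, _ | ⟨p1, _ | ⟨p2, _ | ⟨p3, rest⟩⟩⟩⟩ <;> try simp at h4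
  simp only [PySem.List.pyGetD_ofNat', List.getD_cons_zero, List.getD_cons_succ] at hs2 hsok he2 heok hmel ⊢
  generalize hS : (PySem.Str.split? p0 ":").getD [] = sa at *
  generalize hE : (PySem.Str.split? p1 ":").getD [] = ea at *
  rcases sa with _ | ⟨s0, _ | ⟨s1, srest⟩⟩ <;> try simp at hs2
  rcases ea with _ | ⟨e0, _ | ⟨e1, erest⟩⟩ <;> try simp at he2
  have hsl : PySem.List.slice (p0 :: p1 :: p2 :: p3 :: rest) none (some 4) = [p0, p1, p2, p3] := by
    rw [PySem.List.slice_to _ (by norm_num)]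
    rfl
  rw [hsl]
  simp only [List.map_cons, List.getD_cons_zero, List.getD_cons_succ]
  rw [hS, hE]
  simp only [List.getD_cons_zero, List.getD_cons_succ]
  have hdur : ∀ a b c d : Int, |a * 60 + b - (c * 60 + d)| = |(a - c) * 60 + (b - d)| := by
    intro a b c d; congr 1; ring
  rw [hdur, pvPlayed_eq _ _ hmel (abs_nonneg _)]

lemma solution_alt_eq_pvB (m : String) (ms : List String)
    (hp : ∀ info ∈ ms, pvOk info) :
    solution_alt m ms = pvB (sharpToLower m).toList (ms.map pvEntry) := by
  simp only [solution_alt, pvB, List.foldl_map]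
  have : ∀ (l : List String), (∀ i ∈ l, pvOk i) → ∀ (best : String × Int),
      (l.foldl (fun best info => pvStep (sharpToLower m).toList best info) best)
      = l.foldl (fun best e =>
          if PySem.Chars.isIn (sharpToLower m).toList (pvEntry e).2.1 = true ∧ (pvEntry e).2.2 > best.2
          then ((pvEntry e).1, (pvEntry e).2.2) else best) best := by
    intro l
    induction l with
    | nil => intro _ _; simp only [List.foldl_nil]
    | cons x l ih =>
      intro hl best
      simp only [List.foldl_cons]
      rw [pv_body_eq (sharpToLower m).toList x (hl x List.mem_cons_self) best,
          ih (fun i hi => hl i (List.mem_cons_of_mem x hi))]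
  rw [this ms hp ("(None)", -1)]


/-- Head of an insertion sort started at `b :: rest` is the left fold keeping the smaller key. -/
lemma pv_fold_head {T : Type} (key : T → Int) (d : T) :
    ∀ (L : List T) (b : T) (rest : List T),
      (L.foldl (fun acc x => PySem.List.insertBy (fun a c => decide (key a < key c)) x acc) (b :: rest)).getD 0 d
      = L.foldl (fun c x => if key x < key c then x else c) b := by
  intro L
  induction L with
  | nil => intro b rest; simp
  | cons x L ih =>
    intro b rest
    simp only [List.foldl_cons, PySem.List.insertBy]
    by_cases h : key x < key b
    · simp only [h, decide_true]
      exact ih x (b :: rest)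
    · simp only [h, decide_false]
      exact ih b (PySem.List.insertBy (fun a c => decide (key a < key c)) x rest)

/-- The running (title, dur) pair fold is the projection of the running-best-triple fold. -/
lemma pv_fold_pair (cs : List (String × List Char × Int)) :
    ∀ (c : String × List Char × Int),
      cs.foldl (fun best e => if e.2.2 > best.2 then (e.1, e.2.2) else best) (c.1, c.2.2)
      = ((cs.foldl (fun c x => if x.2.2 > c.2.2 then x else c) c).1,
         (cs.foldl (fun c x => if x.2.2 > c.2.2 then x else c) c).2.2) := by
  induction cs with
  | nil => intro c; rfl
  | cons x cs ih =>
    intro c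
    simp only [List.foldl_cons]
    by_cases h : x.2.2 > c.2.2
    · simp only [if_pos h]; exact ih x
    · simp only [if_neg h]; exact ih c

/-- The two match tests agree: `played.find(m) > -1` iff `m in played`. -/
lemma pv_pred_eq (mt : List Char) :
    (fun x : String × List Char × Int => decide (PySem.Chars.find x.2.1 mt > -1))
      = (fun x => PySem.Chars.isIn mt x.2.1) := by
  funext x
  cases hb : PySem.Chars.isIn mt x.2.1 with
  | false =>
    rw [PySem.Chars.isIn_eq_false_iff, ← PySem.Chars.find_eq_neg_one_iff] at hb
    simp [hb]
  | true =>
    rw [PySem.Chars.isIn_iff_infix, ← PySem.Chars.find_ne_neg_one_iff] at hb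
    have h2 := PySem.Chars.neg_one_le_find x.2.1 mt
    simp only [gt_iff_lt, decide_eq_true_eq]
    omega

/-- Core equivalence on any list of entries with nonnegative durations. -/
lemma pv_core (mt : List Char) (L : List (String × List Char × Int))
    (hL : ∀ e ∈ L, 0 ≤ e.2.2) : pvB mt L = pvA mt L := by
  unfold pvA pvB
  rw [pv_pred_eq]
  have hbody : (fun (best : String × Int) (e : String × List Char × Int) =>
        if PySem.Chars.isIn mt e.2.1 = true ∧ e.2.2 > best.2 then (e.1, e.2.2) else best)
      = (fun best e => if PySem.Chars.isIn mt e.2.1 = true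
          then (if e.2.2 > best.2 then (e.1, e.2.2) else best) else best) := by
    funext best e
    by_cases h1 : PySem.Chars.isIn mt e.2.1 = true
    · by_cases h2 : e.2.2 > best.2 <;> simp [h1, h2]
    · simp [h1]
  rw [hbody, PySem.List.foldl_ite_eq_foldl_filter
        (p := fun e : String × List Char × Int => PySem.Chars.isIn mt e.2.1 = true)
        (f := fun (best : String × Int) (e : String × List Char × Int) =>
          if e.2.2 > best.2 then (e.1, e.2.2) else best)]
  have hd : (fun x : String × List Char × Int => decide (PySem.Chars.isIn mt x.2.1 = true))
      = (fun x => PySem.Chars.isIn mt x.2.1) := by funext x; simp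
  rw [hd]
  rcases hC : L.filter (fun x => PySem.Chars.isIn mt x.2.1) with _ | ⟨c0, cs⟩ <;> rw [hC]
  · simp
  · have hc0 : 0 ≤ c0.2.2 := by
      have hm : c0 ∈ L.filter (fun x => PySem.Chars.isIn mt x.2.1) := by
        rw [hC]; exact List.mem_cons_self
      exact hL c0 (List.mem_of_mem_filter hm)
    rw [if_neg (by simp : ¬ (c0 :: cs) = ([] : List (String × List Char × Int)))]
    rw [List.foldl_cons]
    have hgt : c0.2.2 > (("(None)", -1) : String × Int).2 := by
      show (-1 : Int) < c0.2.2; omega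
    have h1 : (if c0.2.2 > (("(None)", -1) : String × Int).2 then (c0.1, c0.2.2) else (("(None)", -1) : String × Int)) = (c0.1, c0.2.2) := if_pos hgt
    rw [h1, pv_fold_pair cs c0]
    rw [PySem.List.sorted_eq_foldl_insertBy, List.foldl_cons]
    have h0 : PySem.List.insertBy (fun a c => decide ((fun x : String × List Char × Int => -x.2.2) a < (fun x : String × List Char × Int => -x.2.2) c)) c0 [] = [c0] := by
      simp [PySem.List.insertBy]
    rw [h0, PySem.List.pyGetD_zero,
        pv_fold_head (fun x : String × List Char × Int => -x.2.2) ("", [], 0) cs c0 []]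
    have hkey : (fun (c x : String × List Char × Int) =>
          if (fun x : String × List Char × Int => -x.2.2) x < (fun x : String × List Char × Int => -x.2.2) c then x else c)
        = (fun c x => if x.2.2 > c.2.2 then x else c) := by
      funext c x; simp [gt_iff_lt, neg_lt_neg_iff]
    rw [hkey]

theorem pv_main (m : String) (ms : List String) (hp : ∀ info ∈ ms, pvOk info) :
    solution m ms = solution_alt m ms := by
  rw [solution_eq_pvA, solution_alt_eq_pvB m ms hp]
  exact (pv_core (sharpToLower m).toList (ms.map pvEntry)
    (by intro e he; obtain ⟨i, _, rfl⟩ := List.mem_map.mp he; exact pvEntry_dur_nonneg i)).symm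

-- ===== VERDICT (by name: the statement is the Claim_ definition above) =====
theorem solution_spec : Claim_equal_solution := by
  intro m ms _ hpre
  unfold Spec_solution
  exact pv_main m ms hpre
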